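-- pv_equiv track=rewrite | github.com/WGabrielCode/Algorithms_DataStructures | Introduction_to_ComputerScience/Others/50.py | isit
-- ===== SOURCE A (Python) =====
-- def isit( x ) :
-- 	a, b = 1, 1
-- 	s = 2
-- 	while b - a <= x :
-- 		a, b = b, a + b
-- 		s += b
-- 		if s > x :
-- 			return False
-- 		if s == x :
-- 			return True
-- 	return False
-- ===== SOURCE B (Python) =====
-- def isit(x):
--     # x is a tested Fibonacci prefix sum (4, 7, 12, 20, ...) iff x + 1 is a
--     # Fibonacci number >= 5 (sum F_1..F_k = F_{k+2} - 1): advance a bare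
--     # Fibonacci pair until b >= x + 1 and compare.
--     n = x + 1
--     a, b = 3, 5
--     while b < n:
--         a, b = b, a + b
--     return b == n
-- ===== Notes on version B (the rewrite author's own statement) =====
-- stated objective: simpler
-- what changed: B drops A's running-sum accumulator and the two mid-loop returns: using the identity F_1+...+F_k = F_{k+2} - 1 it advances a bare Fibonacci pair (a,b)=(3,5) until b >= x+1 and returns b == x+1.
import Mathlib
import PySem

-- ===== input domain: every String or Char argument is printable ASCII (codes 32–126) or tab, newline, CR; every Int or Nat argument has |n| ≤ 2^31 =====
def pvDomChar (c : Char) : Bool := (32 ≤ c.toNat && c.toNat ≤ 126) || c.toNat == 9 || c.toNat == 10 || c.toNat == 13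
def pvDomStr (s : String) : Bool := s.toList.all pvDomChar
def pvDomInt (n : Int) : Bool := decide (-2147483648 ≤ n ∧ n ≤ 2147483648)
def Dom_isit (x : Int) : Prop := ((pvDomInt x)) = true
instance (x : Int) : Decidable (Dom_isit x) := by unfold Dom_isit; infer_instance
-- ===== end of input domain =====

-- B replaces A's running-sum loop with a bare Fibonacci pair advanced until b ≥ x+1
-- (using sum F_1..F_k = F_{k+2} − 1); objective: simpler (no accumulator, no mid-loop returns).

-- ===== PORT A =====
-- A's while loop, step for step; the fuel only makes the loop total (each iteration
-- grows s by at least 2, so x.toNat + 3 iterations always suffice to reach a return).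
def loopA : Nat → Int → Int → Int → Int → Bool
  | 0, _, _, _, _ => false
  | f+1, a, b, s, x =>
    if b - a ≤ x then
      let b' := a + b
      let s' := s + b'
      if s' > x then false
      else if s' = x then true
      else loopA f b b' s' x
    else false

def isit (x : Int) : Bool := loopA (x.toNat + 3) 1 1 2 x

-- ===== PORT B =====
-- B's while loop; fuel is again only a totality guard (the pair grows geometrically).
def loopB : Nat → Int → Int → Int → Bool
  | 0, _, b, n => b == n
  | f+1, a, b, n => if b < n then loopB f b (a+b) n else b == n

def isit_alt (x : Int) : Bool := loopB (x.toNat + 2) 3 5 (x + 1)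

-- ===== PRECONDITION & SPEC =====
def Spec_isit (x : Int) (out : Bool) : Prop := out = isit_alt x
instance (x : Int) (out : Bool) : Decidable (Spec_isit x out) := by unfold Spec_isit; infer_instance

-- ===== CLAIM (what is proved, stated in full; the proofs are below) =====
def Claim_equal_isit : Prop := ∀ (x : Int), Dom_isit x → Spec_isit x (isit x)

-- ===== LEMMAS AND PROOFS =====

-- once b has reached n, loopB just compares, whatever the fuel
theorem loopB_stop (f : Nat) (a b n : Int) (h : n ≤ b) : loopB f a b n = (b == n) := by
  cases f with
  | zero => rfl
  | succ g => simp [loopB]; omega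

-- lockstep correspondence: A's state (a,b,s) with invariant s = a + 2b − 1
-- corresponds to B's state (a+b, s+1) against n = x+1, while s < x.
theorem loopAB (f : Nat) : ∀ a b s x : Int, 1 ≤ a → a ≤ b → s = a + 2*b - 1 → s < x →
    loopA f a b s x = loopB f (a+b) (s+1) (x+1) := by
  induction f with
  | zero =>
    intro a b s x _ _ _ hs
    simp [loopA, loopB]
    omega
  | succ g ih =>
    intro a b s x ha hab hinv hs
    have hguard : b - a ≤ x := by omega
    have hguardB : s + 1 < x + 1 := by omega
    simp only [loopA, loopB, if_pos hguard, if_pos hguardB]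
    by_cases h1 : s + (a + b) > x
    · rw [if_pos h1, loopB_stop g (s+1) (a+b+(s+1)) (x+1) (by omega)]
      simp; omega
    · rw [if_neg h1]
      by_cases h2 : s + (a + b) = x
      · rw [if_pos h2, loopB_stop g (s+1) (a+b+(s+1)) (x+1) (by omega)]
        simp; omega
      · rw [if_neg h2]
        have := ih b (a+b) (s+(a+b)) x (by omega) (by omega) (by omega) (by omega)
        rw [this]
        congr 1 <;> omega

-- ===== VERDICT (by name: the statement is the Claim_ definition above) =====
theorem isit_spec : Claim_equal_isit := by
  intro x _
  show isit x = isit_alt x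
  unfold isit isit_alt
  rcases Int.lt_or_le x 4 with h4 | h4
  · -- x < 4: A returns false at or before the first sum check; B's pair never moves
    rw [loopB_stop _ 3 5 (x+1) (by omega)]
    show loopA (x.toNat + 2 + 1) 1 1 2 x = _
    simp only [loopA]
    split_ifs with hg hgt heq <;> simp <;> omega
  · rcases Int.lt_or_le x 13 with h13 | h13
    · -- 4 ≤ x < 13: both sides are fully concrete after a few unfoldings
      interval_cases x <;> decide
    · -- x ≥ 13: peel three A steps and two B steps, then apply the lockstep
      -- lemma at A-state (3,5,12) ~ B-state (8,13)
      have key := loopAB x.toNat 3 5 12 x (by omega) (by omega) (by omega) (by omega)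
      show loopA (x.toNat + 2 + 1) 1 1 2 x = loopB (x.toNat + 1 + 1) 3 5 (x+1)
      simp only [loopA, loopB]
      split_ifs <;> first
        | rfl
        | omega
        | (norm_num at key ⊢; exact key)
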